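-- pv_equiv track=rewrite | github.com/gabrieloanca/gmxtools | stats_molaris.py | names
-- ===== SOURCE A (Python) =====
-- def names(fname):
--     base = []
--     pre = []
--
--     try:
--         pre = fname[:fname.index('.')]
--     except:
--         pre = fname
--
--     for i in pre:
--         try:
--             if type (int(i)) == int:
--                 break
--         except:
--             base.append(i)
--     base = ''.join(base)
--     return base
-- ===== SOURCE B (Python) =====
-- def names(fname):
--     base = []
--     for c in fname:
--         if c == '.':
--             break
--         try:
--             int(c)
--             break
--         except:
--             base.append(c)
--     return ''.join(base)
-- ===== Notes on version B (the rewrite author's own statement) =====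
-- stated objective: simpler
-- what changed: B replaces A's two phases (slice the string at the first '.' via index/try-except, then scan that prefix for the first digit) with one left-to-right pass over the original string that stops at the first '.' or digit, so no intermediate prefix list is built.
import Mathlib
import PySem

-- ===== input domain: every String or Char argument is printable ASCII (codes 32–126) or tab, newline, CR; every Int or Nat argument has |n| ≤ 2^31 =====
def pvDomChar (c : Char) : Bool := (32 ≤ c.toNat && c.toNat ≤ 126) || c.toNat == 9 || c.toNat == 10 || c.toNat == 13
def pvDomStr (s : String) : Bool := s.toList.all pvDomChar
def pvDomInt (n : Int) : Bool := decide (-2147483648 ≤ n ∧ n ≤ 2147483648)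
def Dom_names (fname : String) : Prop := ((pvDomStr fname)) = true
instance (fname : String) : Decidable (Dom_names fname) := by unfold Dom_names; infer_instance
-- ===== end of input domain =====

-- B fuses A's two phases (slice at first '.', then scan for first digit) into one pass; objective: simpler.

-- ===== PORT A =====
-- pre = fname[:fname.index('.')] with the ValueError caught (then pre = fname)
def namesPre (cs : List Char) : List Char :=
  match PySem.List.index? cs '.' with
  | some j => cs.take j
  | none => cs

-- the for-loop: append non-digit chars, break at the first char int() accepts
def namesLoopA (acc : List Char) : List Char → List Char
  | [] => acc
  | c :: rest =>
    match PySem.Int.ofChars? [c] with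
    | some _ => acc
    | none => namesLoopA (acc ++ [c]) rest

def names (fname : String) : String :=
  String.ofList (namesLoopA [] (namesPre fname.toList))

-- ===== PORT B =====
-- single pass: stop at '.' or at the first char int() accepts, keep the rest
def namesGo : List Char → List Char
  | [] => []
  | c :: rest =>
    if c = '.' then []
    else
      match PySem.Int.ofChars? [c] with
      | some _ => []
      | none => c :: namesGo rest

def names_alt (fname : String) : String :=
  String.ofList (namesGo fname.toList)

-- ===== PRECONDITION & SPEC =====
def Spec_names (fname : String) (out : String) : Prop := out = names_alt fname
instance (fname : String) (out : String) : Decidable (Spec_names fname out) := by unfold Spec_names; infer_instance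

-- ===== CLAIM (what is proved, stated in full; the proofs are below) =====
def Claim_equal_names : Prop := ∀ (fname : String), Dom_names fname → Spec_names fname (names fname)

-- ===== LEMMAS AND PROOFS =====
theorem namesLoopA_pre_eq (cs : List Char) :
    ∀ acc, namesLoopA acc (namesPre cs) = acc ++ namesGo cs := by
  induction cs with
  | nil => intro acc; simp [namesPre, namesLoopA, namesGo, PySem.List.index?]
  | cons c rest ih =>
    intro acc
    by_cases hc : c = '.'
    · subst hc
      simp only [namesPre, PySem.List.index?_cons_self]
      simp [namesLoopA, namesGo]
    · have hpre : namesPre (c :: rest) = c :: namesPre rest := by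
        simp only [namesPre, PySem.List.index?_cons_of_ne rest hc]
        cases PySem.List.index? rest '.' with
        | none => rfl
        | some j => rfl
      rw [hpre]
      cases hint : PySem.Int.ofChars? [c] with
      | some v =>
        simp [namesLoopA, namesGo, hint, hc]
      | none =>
        simp only [namesLoopA, namesGo, hint, if_neg hc]
        rw [ih]
        simp

-- ===== VERDICT (by name: the statement is the Claim_ definition above) =====
theorem names_spec : Claim_equal_names := by
  intro fname _
  unfold Spec_names names names_alt
  rw [namesLoopA_pre_eq fname.toList []]
  simp
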